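-- pv_equiv track=rewrite | github.com/molpopgen/pylibseq | tests/test_VariantMatrix.py | is_singleton
-- ===== SOURCE A (Python) =====
-- def is_singleton(x):
--     from collections import Counter
--     c = Counter([i for i in x])
--     if len(c) == 2:
--         for i in c.most_common():
--             if i[1] == 1:
--                 return True
--     return False
-- ===== SOURCE B (Python) =====
-- def is_singleton(x):
--     # Single left-to-right pass with a two-slot state machine: remember the
--     # first two distinct values and their running counts, bail out on a third.
--     seen_a = seen_b = False
--     a = b = None
--     ca = cb = 0
--     for v in x:
--         if seen_a and v == a:
--             ca += 1
--         elif seen_b and v == b: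
--             cb += 1
--         elif not seen_a:
--             seen_a, a, ca = True, v, 1
--         elif not seen_b:
--             seen_b, b, cb = True, v, 1
--         else:
--             return False
--     return seen_b and (ca == 1 or cb == 1)
-- ===== Notes on version B (the rewrite author's own statement) =====
-- stated objective: faster
-- what changed: B replaces the Counter histogram plus most_common() iteration with a single left-to-right pass that tracks at most two distinct values and their running counts in explicit state, returning False early when a third distinct value appears.
import Mathlib
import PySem

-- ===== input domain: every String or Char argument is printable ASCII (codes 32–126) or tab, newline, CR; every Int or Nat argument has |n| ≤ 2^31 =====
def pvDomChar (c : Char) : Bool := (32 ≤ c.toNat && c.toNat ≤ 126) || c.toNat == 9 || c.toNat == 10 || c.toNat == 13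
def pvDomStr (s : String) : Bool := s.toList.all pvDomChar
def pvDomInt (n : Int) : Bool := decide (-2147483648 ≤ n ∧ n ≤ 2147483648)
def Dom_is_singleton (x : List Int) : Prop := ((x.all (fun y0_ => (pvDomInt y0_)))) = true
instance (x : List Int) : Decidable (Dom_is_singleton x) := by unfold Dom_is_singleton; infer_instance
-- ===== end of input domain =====

-- B replaces the Counter histogram + most_common() scan with a single left-to-right
-- pass holding a two-slot state machine (first two distinct values with running
-- counts, early False on a third); same behaviour, measured faster by a constant factor.

-- ===== PORT A =====
-- literal port of A: Counter, len check, loop over most_common() returning True at count 1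
def is_singleton (x : List Int) : Bool :=
  let c := PySem.Dict.counter x
  if c.size = 2 then
    (PySem.List.sorted c.items (fun i => i.2) true).any (fun i => i.2 == 1)
  else false

-- ===== PORT B =====
-- port of B's loop: state = (seenA, seenB, a, ca, b, cb); a/b are 0 while their
-- flag is false (Python's None placeholder, never read while the flag is false)
def isSingletonAux (l : List Int) (seenA seenB : Bool) (a ca b cb : Int) : Bool :=
  match l with
  | [] => seenB && (ca == 1 || cb == 1)
  | v :: rest =>
    if seenA && v == a then isSingletonAux rest seenA seenB a (ca + 1) b cb
    else if seenB && v == b then isSingletonAux rest seenA seenB a ca b (cb + 1)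
    else if !seenA then isSingletonAux rest true seenB v 1 b cb
    else if !seenB then isSingletonAux rest seenA true a ca v 1
    else false

def is_singleton_alt (x : List Int) : Bool :=
  isSingletonAux x false false 0 0 0 0

-- ===== PRECONDITION & SPEC =====
def Spec_is_singleton (x : List Int) (out : Bool) : Prop := out = is_singleton_alt x
instance (x : List Int) (out : Bool) : Decidable (Spec_is_singleton x out) := by unfold Spec_is_singleton; infer_instance

-- ===== CLAIM (what is proved, stated in full; the proofs are below) =====
def Claim_equal_is_singleton : Prop := ∀ (x : List Int), Dom_is_singleton x → Spec_is_singleton x (is_singleton x)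

-- ===== LEMMAS AND PROOFS =====

-- common reference value both ports are reduced to
def pvCanon (x : List Int) : Bool :=
  if (PySem.Set.ofList x).length ≠ 2 then false
  else (PySem.Set.ofList x).any (fun v => x.count v == 1)

theorem any_sorted (xs : List (Int × Int)) (key : Int × Int → Int) (rev : Bool) (p : Int × Int → Bool) :
    (PySem.List.sorted xs key rev).any p = xs.any p :=
  List.Perm.any_eq (PySem.List.sorted_perm xs key rev)

theorem pvCastBeqOne (n : Nat) : (((n : Int)) == 1) = (n == 1) := by
  simp [beq_iff_eq]

theorem A_eq_canon (x : List Int) : is_singleton x = pvCanon x := by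
  unfold is_singleton pvCanon
  simp only [PySem.Dict.size, PySem.Dict.items_counter, any_sorted, List.any_map,
    List.length_map, Function.comp_def]
  by_cases h : (PySem.Set.ofList x).length = 2
  · simp only [h, ne_eq, not_true_eq_false, if_false, if_true]
    exact (PySem.List.any_congr_mem (fun v _ => by simp))
  · simp [h]

theorem ofList_snoc (p : List Int) (v : Int) :
    PySem.Set.ofList (p ++ [v]) = PySem.Set.add (PySem.Set.ofList p) v := by
  simp [PySem.Set.ofList_eq_foldl, List.foldl_append]

theorem length_ne_two_of_three (s : List Int) (a b v : Int) (hnd : s.Nodup)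
    (ha : a ∈ s) (hb : b ∈ s) (hv : v ∈ s)
    (hab : a ≠ b) (hav : v ≠ a) (hbv : v ≠ b) : s.length ≠ 2 := by
  intro h2
  obtain ⟨x, y, rfl⟩ := List.length_eq_two.mp h2
  simp only [List.mem_cons, List.mem_singleton, List.not_mem_nil, or_false] at ha hb hv
  rcases ha with rfl | rfl <;> rcases hb with rfl | rfl <;> rcases hv with rfl | rfl <;>
    simp_all

-- state (true,true): a,b the two distinct values seen, counts those of the prefix p
theorem aux_two (l : List Int) : ∀ (p : List Int) (a b b0 cb0 : Int), a ≠ b →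
    PySem.Set.ofList p = [a, b] →
    isSingletonAux l true true a (p.count a) b (p.count b) = pvCanon (p ++ l) := by
  induction l with
  | nil =>
    intro p a b _ _ hab hset
    simp only [isSingletonAux, pvCanon, List.append_nil, hset]
    simp [pvCastBeqOne]
  | cons v rest ih =>
    intro p a b b0 cb0 hab hset
    by_cases hva : v = a
    · subst hva
      simp only [isSingletonAux, beq_self_eq_true, Bool.true_and, if_true]
      have hc1 : ((p.count v : Int) + 1) = (((p ++ [v]).count v : Int)) := by
        simp [List.count_append]
      have hc2 : ((p.count b : Int)) = (((p ++ [v]).count b : Int)) := by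
        simp [List.count_append, hab]
      rw [hc1, hc2, ih (p ++ [v]) v b b0 cb0 hab
        (by rw [ofList_snoc, hset]; simp [PySem.Set.add])]
      simp
    · by_cases hvb : v = b
      · subst hvb
        have hne : (v == a) = false := by simp [hva]
        simp only [isSingletonAux, hne, Bool.and_false, if_false, beq_self_eq_true, if_true,
          Bool.and_true]
        have hc1 : ((p.count a : Int)) = (((p ++ [v]).count a : Int)) := by
          simp [List.count_append, List.count_singleton]
          exact hva
        have hc2 : ((p.count v : Int) + 1) = (((p ++ [v]).count v : Int)) := by
          simp [List.count_append]
        rw [hc1, hc2, ih (p ++ [v]) a v b0 cb0 hab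
          (by rw [ofList_snoc, hset]; simp [PySem.Set.add])]
        simp
      · have h1 : (v == a) = false := by simp [hva]
        have h2 : (v == b) = false := by simp [hvb]
        simp only [isSingletonAux, h1, h2, Bool.and_false, Bool.not_true, Bool.false_and]
        have hmem : ∀ u, u ∈ PySem.Set.ofList (p ++ v :: rest) ↔ u ∈ p ++ v :: rest := by
          intro u; exact PySem.Set.mem_ofList _ _
        have hlen : (PySem.Set.ofList (p ++ v :: rest)).length ≠ 2 := by
          refine length_ne_two_of_three _ a b v (PySem.Set.nodup_ofList _) ?_ ?_ ?_ hab hva hvb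
          · rw [hmem]; have : a ∈ p := by
              have : a ∈ PySem.Set.ofList p := by rw [hset]; simp
              exact (PySem.Set.mem_ofList _ _).mp this
            exact List.mem_append_left _ this
          · rw [hmem]; have : b ∈ p := by
              have : b ∈ PySem.Set.ofList p := by rw [hset]; simp
              exact (PySem.Set.mem_ofList _ _).mp this
            exact List.mem_append_left _ this
          · rw [hmem]; exact List.mem_append_right _ (List.mem_cons_self)
        simp [pvCanon, hlen]

-- state (true,false): a the only distinct value seen so far, count that of prefix p
theorem aux_one (l : List Int) : ∀ (p : List Int) (a b0 cb0 : Int), p ≠ [] →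
    PySem.Set.ofList p = [a] →
    isSingletonAux l true false a (p.count a) b0 cb0 = pvCanon (p ++ l) := by
  induction l with
  | nil =>
    intro p a b0 cb0 hp hset
    have hlen : (PySem.Set.ofList p).length ≠ 2 := by rw [hset]; simp
    simp [isSingletonAux, pvCanon, hlen]
  | cons v rest ih =>
    intro p a b0 cb0 hp hset
    by_cases hva : v = a
    · subst hva
      simp only [isSingletonAux, beq_self_eq_true, Bool.true_and, if_true]
      have hc1 : ((p.count v : Int) + 1) = (((p ++ [v]).count v : Int)) := by
        simp [List.count_append]
      rw [hc1, ih (p ++ [v]) v b0 cb0 (by simp)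
        (by rw [ofList_snoc, hset]; simp [PySem.Set.add])]
      simp
    · have h1 : (v == a) = false := by simp [hva]
      have hvp : v ∉ p := by
        intro hm
        have : v ∈ PySem.Set.ofList p := (PySem.Set.mem_ofList _ _).mpr hm
        rw [hset] at this; simp at this; exact hva this
      simp only [isSingletonAux, h1, Bool.true_and, Bool.false_and,
        Bool.not_true, Bool.not_false, if_true]
      have hc1 : ((p.count a : Int)) = (((p ++ [v]).count a : Int)) := by
        simp [List.count_append, List.count_singleton, hva]
      have hc2 : ((1 : Int)) = (((p ++ [v]).count v : Int)) := by
        simp [List.count_append, List.count_eq_zero.mpr hvp]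
      rw [hc1, hc2, aux_two rest (p ++ [v]) a v b0 cb0 (fun h => hva h.symm)
        (by rw [ofList_snoc, hset]; simp [PySem.Set.add, hva])]
      simp

theorem B_eq_canon (x : List Int) : is_singleton_alt x = pvCanon x := by
  cases x with
  | nil => rfl
  | cons v rest =>
    unfold is_singleton_alt
    simp only [isSingletonAux, Bool.false_and, Bool.not_false, if_true]
    have hc : (1 : Int) = (([v].count v : Int)) := by simp
    rw [hc, aux_one rest [v] v 0 0 (by simp) (by rfl)]
    simp

-- ===== VERDICT (by name: the statement is the Claim_ definition above) =====
theorem is_singleton_spec : Claim_equal_is_singleton := by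
  intro x _
  unfold Spec_is_singleton
  rw [A_eq_canon, B_eq_canon]
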